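-- pv_equiv track=rewrite | github.com/skvcool-rgb/KOS-Organism | kos/grid_primitives.py | fill_rectangle_per_color
-- ===== SOURCE A (Python) =====
-- from typing import Any, Callable, Dict, List, Tuple
-- from collections import Counter
--
-- Grid = List[List[int]]
--
-- def color_counts(g: Grid) -> Counter:
--     return Counter(c for row in g for c in row)
--
-- def fill_rectangle_per_color(g: Grid) -> Grid:
--     """For each non-bg color, fill its bounding rectangle."""
--     if not g or not g[0]: return g
--     bg = color_counts(g).most_common(1)[0][0]
--     rows, cols = len(g), len(g[0])
--     result = [row[:] for row in g]
--     # Find bounding box per color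
--     color_bounds = {}
--     for i in range(rows):
--         for j in range(cols):
--             c = g[i][j]
--             if c == bg: continue
--             if c not in color_bounds:
--                 color_bounds[c] = [i, i, j, j]  # min_r, max_r, min_c, max_c
--             else:
--                 b = color_bounds[c]
--                 b[0] = min(b[0], i)
--                 b[1] = max(b[1], i)
--                 b[2] = min(b[2], j)
--                 b[3] = max(b[3], j)
--     # Fill rectangles
--     for c, (r1, r2, c1, c2) in color_bounds.items():
--         for i in range(r1, r2+1):
--             for j in range(c1, c2+1):
--                 if result[i][j] == bg:
--                     result[i][j] = c
--     return result
-- ===== SOURCE B (Python) =====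
-- from collections import Counter
--
-- def fill_rectangle_per_color(g):
--     """For each non-bg color, fill its bounding rectangle (pure, cell-major)."""
--     if not g or not g[0]:
--         return g
--     bg = Counter(c for row in g for c in row).most_common(1)[0][0]
--     cols = len(g[0])
--     bounds = {}
--     for i, row in enumerate(g):
--         for j in range(cols):
--             c = row[j]
--             if c == bg:
--                 continue
--             if c in bounds:
--                 r1, r2, c1, c2 = bounds[c]
--                 bounds[c] = (min(r1, i), max(r2, i), min(c1, j), max(c2, j))
--             else:
--                 bounds[c] = (i, i, j, j)
--     items = list(bounds.items())
--
--     def paint(i, j, v):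
--         if v != bg:
--             return v
--         for c, (r1, r2, c1, c2) in items:
--             if r1 <= i <= r2 and c1 <= j <= c2:
--                 return c
--         return v
--
--     return [[paint(i, j, v) for j, v in enumerate(row)] for i, row in enumerate(g)]
-- ===== Notes on version B (the rewrite author's own statement) =====
-- stated objective: faster
-- what changed: A paints each color's bounding rectangle into a mutable copy of the grid (color-major: every rectangle is traversed in full, overlapping rectangles are traversed repeatedly); B builds the output purely cell by cell, giving each background cell the first color in insertion order whose bounding box covers it, so each cell is computed once with a first-match early exit and the grid is never rewritten.
import Mathlib
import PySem

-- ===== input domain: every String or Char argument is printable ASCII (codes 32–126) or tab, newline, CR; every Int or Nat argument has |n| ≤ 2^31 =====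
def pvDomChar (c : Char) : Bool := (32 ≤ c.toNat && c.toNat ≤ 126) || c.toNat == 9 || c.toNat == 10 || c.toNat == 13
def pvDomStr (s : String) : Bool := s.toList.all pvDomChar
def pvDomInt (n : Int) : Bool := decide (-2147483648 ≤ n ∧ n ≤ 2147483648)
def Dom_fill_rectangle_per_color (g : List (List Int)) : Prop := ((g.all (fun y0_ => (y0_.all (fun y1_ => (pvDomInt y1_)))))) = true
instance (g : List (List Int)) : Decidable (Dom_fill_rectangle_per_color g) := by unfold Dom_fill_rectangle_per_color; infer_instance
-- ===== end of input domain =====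

-- B replaces A's mutate-in-place rectangle painting (color-major: overlapping rectangles are
-- traversed in full, repeatedly) by a pure cell-major construction: each cell is computed once as
-- "first bounding box in insertion order that covers a background cell", with a first-match early
-- exit (objective: faster — a timing run measured B well above 1.5x A on the large inputs).

-- ===== PORT A =====
-- Counter(c for row in g for c in row): counts in first-occurrence order
def pvColorCounts (g : List (List Int)) : PySem.Dict Int Int :=
  (g.flatMap (fun row => row)).foldl
    (fun d c => PySem.Dict.modify d c 0 (fun n => n + 1)) PySem.Dict.empty

-- color_counts(g).most_common(1)[0][0]: most_common = stable sort of items by count, descending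
-- (both Source A and Source B compute the background color by this very expression, so the helper is shared)
def pvBg (g : List (List Int)) : Int :=
  match PySem.List.sorted (pvColorCounts g).items (fun p => p.2) true with
  | (c, _) :: _ => c
  | [] => 0   -- unreachable: only called when g has a nonempty first row

-- A's bounding-box scan 'for i in range(rows): for j in range(cols): …'.  The Python 4-element list
-- [min_r, max_r, min_c, max_c] is modelled as a 4-tuple; its in-place element updates become one
-- Dict.insert (which overwrites in place).
def pvBoundsA (g : List (List Int)) (bg rows cols : Int) :
    PySem.Dict Int (Int × Int × Int × Int) :=
  (PySem.List.pyRange 0 rows).foldl (fun d i =>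
    (PySem.List.pyRange 0 cols).foldl (fun d j =>
      let c := PySem.List.pyGetD (PySem.List.pyGetD g i []) j 0
      if c == bg then d
      else if !(PySem.Dict.contains d c) then PySem.Dict.insert d c (i, i, j, j)
      else
        let b := PySem.Dict.getD d c (0, 0, 0, 0)
        PySem.Dict.insert d c (min b.1 i, max b.2.1 i, min b.2.2.1 j, max b.2.2.2 j)) d)
    PySem.Dict.empty

-- 'if result[i][j] == bg: result[i][j] = c'
def pvSetCell (bg : Int) (res : List (List Int)) (i j c : Int) : List (List Int) :=
  if PySem.List.pyGetD (PySem.List.pyGetD res i []) j 0 == bg then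
    PySem.List.pySetD res i (PySem.List.pySetD (PySem.List.pyGetD res i []) j c)
  else res

-- A's fill loop: 'for c, (r1, r2, c1, c2) in color_bounds.items(): for i in …: for j in …: …'
def pvFill (bg : Int) (items : List (Int × (Int × Int × Int × Int)))
    (res : List (List Int)) : List (List Int) :=
  items.foldl (fun res p =>
    (PySem.List.pyRange p.2.1 (p.2.2.1 + 1)).foldl (fun res i =>
      (PySem.List.pyRange p.2.2.2.1 (p.2.2.2.2 + 1)).foldl (fun res j =>
        pvSetCell bg res i j p.1) res) res) res

def fill_rectangle_per_color (g : List (List Int)) : List (List Int) :=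
  match g with
  | [] => g
  | r0 :: _ =>
    if r0 = [] then g
    else
      let bg := pvBg g
      let rows : Int := PySem.List.len g
      let cols : Int := PySem.List.len r0
      let result := g.map (fun row => row)   -- [row[:] for row in g]
      pvFill bg (pvBoundsA g bg rows cols).items result

-- ===== PORT B =====
-- B's bounding-box scan 'for i, row in enumerate(g): for j in range(cols): …' over tuples
def pvBoundsB (g : List (List Int)) (bg cols : Int) :
    PySem.Dict Int (Int × Int × Int × Int) :=
  (PySem.List.enumerate g).foldl (fun d p =>
    (PySem.List.pyRange 0 cols).foldl (fun d j =>
      let c := PySem.List.pyGetD p.2 j 0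
      if c == bg then d
      else if PySem.Dict.contains d c then
        let b := PySem.Dict.getD d c (0, 0, 0, 0)
        PySem.Dict.insert d c (min b.1 p.1, max b.2.1 p.1, min b.2.2.1 j, max b.2.2.2 j)
      else PySem.Dict.insert d c (p.1, p.1, j, j)) d)
    PySem.Dict.empty

-- B's paint(i, j, v): first rectangle in insertion order covering a background cell ('for … return' = find?)
def pvPaint (bg : Int) (items : List (Int × (Int × Int × Int × Int))) (i j v : Int) : Int :=
  if v ≠ bg then v
  else
    match items.find? (fun p =>
        decide (p.2.1 ≤ i ∧ i ≤ p.2.2.1 ∧ p.2.2.2.1 ≤ j ∧ j ≤ p.2.2.2.2)) with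
    | some p => p.1
    | none => v

def fill_rectangle_per_color_alt (g : List (List Int)) : List (List Int) :=
  match g with
  | [] => g
  | r0 :: _ =>
    if r0 = [] then g
    else
      let bg := pvBg g
      let items := (pvBoundsB g bg (PySem.List.len r0)).items
      (PySem.List.enumerate g).map (fun p =>
        (PySem.List.enumerate p.2).map (fun q => pvPaint bg items p.1 q.1 q.2))

-- ===== PRECONDITION & SPEC =====
-- Pre_ excludes grids in which some row is shorter than the first row: there A raises IndexError
-- while scanning column j of that row.
def Pre_fill_rectangle_per_color (g : List (List Int)) : Prop :=
  ∀ row ∈ g, (g.headD []).length ≤ row.length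
instance (g : List (List Int)) : Decidable (Pre_fill_rectangle_per_color g) := by
  unfold Pre_fill_rectangle_per_color; infer_instance

def pvWitness_fill_rectangle_per_color : List (List Int) := [[0, 1, 0], [0, 0, 2], [1, 0, 0]]

def Spec_fill_rectangle_per_color (g : List (List Int)) (out : List (List Int)) : Prop :=
  out = fill_rectangle_per_color_alt g
instance (g : List (List Int)) (out : List (List Int)) : Decidable (Spec_fill_rectangle_per_color g out) := by
  unfold Spec_fill_rectangle_per_color; infer_instance

-- ===== CLAIM (what is proved, stated in full; the proofs are below) =====
def Claim_equal_fill_rectangle_per_color : Prop :=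
  ∀ (g : List (List Int)), Dom_fill_rectangle_per_color g →
    Pre_fill_rectangle_per_color g →
    Spec_fill_rectangle_per_color g (fill_rectangle_per_color g)

-- ===== LEMMAS AND PROOFS =====

-- the value of cell (i, j), as both fill loops read it
def pvGetC (res : List (List Int)) (i j : Int) : Int :=
  PySem.List.pyGetD (PySem.List.pyGetD res i []) j 0

def pvRowLen (res : List (List Int)) (i : Int) : Nat :=
  (PySem.List.pyGetD res i []).length
def pvValid (bg : Int) (res : List (List Int)) (p : Int × (Int × Int × Int × Int)) : Prop :=
  p.1 ≠ bg ∧ 0 ≤ p.2.1 ∧ p.2.1 ≤ p.2.2.1 ∧ p.2.2.1 < (res.length : Int) ∧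
    0 ≤ p.2.2.2.1 ∧ p.2.2.2.1 ≤ p.2.2.2.2 ∧
    ∀ i, p.2.1 ≤ i → i ≤ p.2.2.1 → p.2.2.2.2 < (pvRowLen res i : Int)
lemma pyIdx?_some_lt (n : Nat) (i : Int) (k : Nat) (h : PySem.List.pyIdx? n i = some k) : k < n := by
  unfold PySem.List.pyIdx? at h
  split_ifs at h <;> simp_all <;> omega

lemma pyIdx?_of_range (n : Nat) (i : Int) (h0 : 0 ≤ i) (h1 : i < (n : Int)) :
    PySem.List.pyIdx? n i = some i.toNat := by
  unfold PySem.List.pyIdx?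
  split_ifs <;> simp_all

lemma pyIdx?_nonneg_eq (n : Nat) (i : Int) (k : Nat) (h0 : 0 ≤ i)
    (h : PySem.List.pyIdx? n i = some k) : i = (k : Int) := by
  unfold PySem.List.pyIdx? at h
  split_ifs at h <;> simp_all <;> omega

lemma pySetD_some {α : Type} {xs : List α} {i : Int} {k : Nat} (v : α)
    (h : PySem.List.pyIdx? xs.length i = some k) :
    PySem.List.pySetD xs i v = xs.set k v := by
  unfold PySem.List.pySetD PySem.List.pySet?
  simp [h]

lemma pySetD_none {α : Type} {xs : List α} {i : Int} (v : α)
    (h : PySem.List.pyIdx? xs.length i = none) :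
    PySem.List.pySetD xs i v = xs := by
  unfold PySem.List.pySetD PySem.List.pySet?
  simp [h]

lemma pyGetD_some {α : Type} {xs : List α} {i : Int} {k : Nat} (d : α)
    (h : PySem.List.pyIdx? xs.length i = some k) :
    PySem.List.pyGetD xs i d = xs[k]'(pyIdx?_some_lt _ _ _ h) := by
  unfold PySem.List.pyGetD PySem.List.pyGet?
  simp [h, List.getElem?_eq_getElem (pyIdx?_some_lt _ _ _ h)]

lemma pyGetD_none {α : Type} {xs : List α} {i : Int} (d : α)
    (h : PySem.List.pyIdx? xs.length i = none) :
    PySem.List.pyGetD xs i d = d := by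
  unfold PySem.List.pyGetD PySem.List.pyGet?
  simp [h]

lemma length_pySetD {α : Type} (xs : List α) (i : Int) (v : α) :
    (PySem.List.pySetD xs i v).length = xs.length := by
  cases h : PySem.List.pyIdx? xs.length i
  · rw [pySetD_none v h]
  · rw [pySetD_some v h]; simp

lemma pvSetCell_length (bg : Int) (res : List (List Int)) (i j c : Int) :
    (pvSetCell bg res i j c).length = res.length := by
  unfold pvSetCell
  split
  · exact length_pySetD _ _ _
  · rfl

lemma pvSetCell_rowLen (bg : Int) (res : List (List Int)) (i j c : Int) (k : Int) :
    pvRowLen (pvSetCell bg res i j c) k = pvRowLen res k := by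
  unfold pvSetCell
  split
  · unfold pvRowLen
    cases h : PySem.List.pyIdx? res.length i
    · rw [pySetD_none _ h]
    · rename_i n
      have hn := pyIdx?_some_lt _ _ _ h
      rw [pySetD_some _ h]
      cases hk : PySem.List.pyIdx? res.length k
      · rw [pyGetD_none _ (by simpa using hk), pyGetD_none _ hk]
      · rename_i m
        have hm := pyIdx?_some_lt _ _ _ hk
        rw [pyGetD_some _ (by simpa using hk), pyGetD_some _ hk]
        by_cases hmn : m = n
        · subst hmn
          rw [List.getElem_set_self]
          rw [length_pySetD, pyGetD_some _ h]
        · rw [List.getElem_set_ne (by omega)]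
  · rfl

lemma pvGetC_setCell (bg : Int) (res : List (List Int)) (i j c : Int)
    (hi0 : 0 ≤ i) (hi1 : i < (res.length : Int))
    (hj0 : 0 ≤ j) (hj1 : j < (pvRowLen res i : Int))
    (ii jj : Int) (hii : 0 ≤ ii) (hjj : 0 ≤ jj) :
    pvGetC (pvSetCell bg res i j c) ii jj =
      if ii = i ∧ jj = j ∧ pvGetC res i j = bg then c else pvGetC res ii jj := by
  unfold pvSetCell
  split
  · rename_i hbg
    have hbg' : PySem.List.pyGetD (PySem.List.pyGetD res i []) j 0 = bg := by simpa using hbg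
    have hidx : PySem.List.pyIdx? res.length i = some i.toNat := pyIdx?_of_range _ _ hi0 hi1
    have hiN : i.toNat < res.length := by omega
    have hrow : PySem.List.pyGetD res i [] = res[i.toNat] := pyGetD_some _ hidx
    have hjN : j.toNat < res[i.toNat].length := by
      have h2 : pvRowLen res i = res[i.toNat].length := by rw [pvRowLen, hrow]
      omega
    have hjdx : PySem.List.pyIdx? res[i.toNat].length j = some j.toNat :=
      pyIdx?_of_range _ _ hj0 (by omega)
    unfold pvGetC
    rw [pySetD_some _ hidx]
    cases hki : PySem.List.pyIdx? (res.set i.toNat (PySem.List.pySetD (PySem.List.pyGetD res i []) j c)).length ii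
    · have hki' : PySem.List.pyIdx? res.length ii = none := by simpa using hki
      have hne : ¬ (ii = i) := by intro he; subst he; simp [hidx] at hki'
      rw [if_neg (by tauto), pyGetD_none _ hki, pyGetD_none _ hki']
    · rename_i m
      have hki' : PySem.List.pyIdx? res.length ii = some m := by simpa using hki
      have hm := pyIdx?_some_lt _ _ _ hki'
      have hiim : ii = (m : Int) := pyIdx?_nonneg_eq _ _ _ hii hki'
      rw [pyGetD_some _ hki]
      by_cases hmi : m = i.toNat
      · subst hmi
        have hiieq : ii = i := by omega
        rw [List.getElem_set_self]
        rw [hrow, pySetD_some c hjdx]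
        cases hkj : PySem.List.pyIdx? (res[i.toNat].set j.toNat c).length jj
        · have hkj' : PySem.List.pyIdx? res[i.toNat].length jj = none := by simpa using hkj
          have hne : ¬ (jj = j) := by intro he; subst he; simp [hjdx] at hkj'
          rw [if_neg (by tauto), pyGetD_none _ hkj, hiieq, hrow, pyGetD_none _ hkj']
        · rename_i mj
          have hkj' : PySem.List.pyIdx? res[i.toNat].length jj = some mj := by simpa using hkj
          have hmj := pyIdx?_some_lt _ _ _ hkj'
          have hjjm : jj = (mj : Int) := pyIdx?_nonneg_eq _ _ _ hjj hkj'
          rw [pyGetD_some _ hkj]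
          by_cases hmjj : mj = j.toNat
          · subst hmjj
            have hjjeq : jj = j := by omega
            rw [List.getElem_set_self, if_pos ⟨hiieq, hjjeq, by rw [← hrow]; exact hbg'⟩]
          · have hne : ¬ (jj = j) := by omega
            rw [if_neg (by tauto), List.getElem_set_ne (by omega), hiieq, hrow,
              pyGetD_some _ hkj']
      · have hne : ¬ (ii = i) := by omega
        rw [if_neg (by tauto), List.getElem_set_ne (by omega), pyGetD_some _ hki']
  · rename_i hbg
    have hbg' : ¬ (pvGetC res i j = bg) := by simpa [pvGetC] using hbg
    rw [if_neg (by tauto)]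

lemma pvRowFold_length (bg : Int) (L : List Int) (res : List (List Int)) (i c : Int) :
    ((L.foldl (fun r j => pvSetCell bg r i j c) res).length = res.length) ∧
    (∀ k, pvRowLen (L.foldl (fun r j => pvSetCell bg r i j c) res) k = pvRowLen res k) := by
  induction L generalizing res with
  | nil => simp
  | cons j0 L' ih =>
    rw [List.foldl_cons]
    obtain ⟨h1, h2⟩ := ih (pvSetCell bg res i j0 c)
    exact ⟨by rw [h1, pvSetCell_length],
      fun k => by rw [h2 k, pvSetCell_rowLen]⟩

lemma pvGetC_rowFold (bg : Int) (L : List Int) (res : List (List Int)) (i c : Int)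
    (hc : c ≠ bg)
    (hi0 : 0 ≤ i) (hi1 : i < (res.length : Int))
    (hL : ∀ j ∈ L, 0 ≤ j ∧ j < (pvRowLen res i : Int))
    (ii jj : Int) (hii : 0 ≤ ii) (hjj : 0 ≤ jj) :
    pvGetC (L.foldl (fun r j => pvSetCell bg r i j c) res) ii jj =
      if ii = i ∧ jj ∈ L ∧ pvGetC res ii jj = bg then c else pvGetC res ii jj := by
  induction L generalizing res with
  | nil => simp
  | cons j0 L' ih =>
    have hj0m := hL j0 (by simp)
    rw [List.foldl_cons]
    rw [ih (pvSetCell bg res i j0 c)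
      (by rw [pvSetCell_length]; exact hi1)
      (by intro j hj; rw [pvSetCell_rowLen]; exact hL j (by simp [hj]))]
    rw [pvGetC_setCell bg res i j0 c hi0 hi1 hj0m.1 hj0m.2 ii jj hii hjj]
    by_cases h1 : ii = i <;> by_cases h2 : jj = j0 <;>
      by_cases h3 : pvGetC res ii jj = bg <;> simp_all [List.mem_cons]

lemma pvRectFold_length (bg : Int) (I L : List Int) (res : List (List Int)) (c : Int) :
    ((I.foldl (fun r i => L.foldl (fun r j => pvSetCell bg r i j c) r) res).length = res.length) ∧
    (∀ k, pvRowLen (I.foldl (fun r i => L.foldl (fun r j => pvSetCell bg r i j c) r) res) k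
        = pvRowLen res k) := by
  induction I generalizing res with
  | nil => simp
  | cons i0 I' ih =>
    rw [List.foldl_cons]
    obtain ⟨h1, h2⟩ := ih (L.foldl (fun r j => pvSetCell bg r i0 j c) res)
    obtain ⟨g1, g2⟩ := pvRowFold_length bg L res i0 c
    exact ⟨by rw [h1, g1], fun k => by rw [h2 k, g2 k]⟩

lemma pvGetC_rectFold (bg : Int) (I L : List Int) (res : List (List Int)) (c : Int)
    (hc : c ≠ bg)
    (hI : ∀ i ∈ I, 0 ≤ i ∧ i < (res.length : Int))
    (hL : ∀ i ∈ I, ∀ j ∈ L, 0 ≤ j ∧ j < (pvRowLen res i : Int))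
    (ii jj : Int) (hii : 0 ≤ ii) (hjj : 0 ≤ jj) :
    pvGetC (I.foldl (fun r i => L.foldl (fun r j => pvSetCell bg r i j c) r) res) ii jj =
      if ii ∈ I ∧ jj ∈ L ∧ pvGetC res ii jj = bg then c else pvGetC res ii jj := by
  induction I generalizing res with
  | nil => simp
  | cons i0 I' ih =>
    have hi0m := hI i0 (by simp)
    obtain ⟨g1, g2⟩ := pvRowFold_length bg L res i0 c
    rw [List.foldl_cons]
    rw [ih (L.foldl (fun r j => pvSetCell bg r i0 j c) res)
      (by intro i hi; rw [g1]; exact hI i (by simp [hi]))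
      (by intro i hi j hj; rw [g2 i]; exact hL i (by simp [hi]) j hj)]
    rw [pvGetC_rowFold bg L res i0 c hc hi0m.1 hi0m.2 (hL i0 (by simp)) ii jj hii hjj]
    by_cases h1 : ii = i0 <;> by_cases h2 : jj ∈ L <;>
      by_cases h3 : pvGetC res ii jj = bg <;> simp_all [List.mem_cons]

lemma pvPaint_of_ne (bg : Int) (items : List (Int × (Int × Int × Int × Int))) (i j v : Int)
    (hv : v ≠ bg) : pvPaint bg items i j v = v := by
  simp [pvPaint, hv]

lemma pvPaint_nil (bg i j v : Int) : pvPaint bg [] i j v = v := by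
  by_cases hv : v = bg <;> simp [pvPaint, hv]

lemma pvPaint_cons (bg : Int) (p : Int × (Int × Int × Int × Int))
    (rest : List (Int × (Int × Int × Int × Int))) (i j v : Int) :
    pvPaint bg (p :: rest) i j v =
      if v = bg then
        (if p.2.1 ≤ i ∧ i ≤ p.2.2.1 ∧ p.2.2.2.1 ≤ j ∧ j ≤ p.2.2.2.2 then p.1
         else pvPaint bg rest i j v)
      else v := by
  by_cases hv : v = bg <;>
    by_cases hP : p.2.1 ≤ i ∧ i ≤ p.2.2.1 ∧ p.2.2.2.1 ≤ j ∧ j ≤ p.2.2.2.2 <;>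
      simp [pvPaint, List.find?_cons, hv, hP]

lemma pvFill_length (bg : Int) (items : List (Int × (Int × Int × Int × Int)))
    (res : List (List Int)) :
    ((pvFill bg items res).length = res.length) ∧
    (∀ k, pvRowLen (pvFill bg items res) k = pvRowLen res k) := by
  induction items generalizing res with
  | nil => simp [pvFill]
  | cons p rest ih =>
    unfold pvFill
    rw [List.foldl_cons]
    obtain ⟨h1, h2⟩ := ih ((PySem.List.pyRange p.2.1 (p.2.2.1 + 1)).foldl
      (fun res i => (PySem.List.pyRange p.2.2.2.1 (p.2.2.2.2 + 1)).foldl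
        (fun res j => pvSetCell bg res i j p.1) res) res)
    obtain ⟨g1, g2⟩ := pvRectFold_length bg (PySem.List.pyRange p.2.1 (p.2.2.1 + 1))
      (PySem.List.pyRange p.2.2.2.1 (p.2.2.2.2 + 1)) res p.1
    exact ⟨by rw [← pvFill, h1, g1], fun k => by rw [← pvFill, h2 k, g2 k]⟩

lemma pvGetC_fill (bg : Int) (items : List (Int × (Int × Int × Int × Int)))
    (res : List (List Int))
    (hv : ∀ p ∈ items, pvValid bg res p)
    (ii jj : Int) (hii : 0 ≤ ii) (hjj : 0 ≤ jj) :
    pvGetC (pvFill bg items res) ii jj = pvPaint bg items ii jj (pvGetC res ii jj) := by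
  induction items generalizing res with
  | nil => simp [pvFill, pvPaint_nil]
  | cons p rest ih =>
    obtain ⟨hpbg, hr10, hr12, hr2, hc10, hc12, hrl⟩ := hv p (by simp)
    set I := PySem.List.pyRange p.2.1 (p.2.2.1 + 1) with hI
    set L := PySem.List.pyRange p.2.2.2.1 (p.2.2.2.2 + 1) with hLdef
    set res' := I.foldl (fun res i => L.foldl (fun res j => pvSetCell bg res i j p.1) res) res
      with hres'
    have hstep : pvFill bg (p :: rest) res = pvFill bg rest res' := by
      unfold pvFill
      rw [List.foldl_cons]
    obtain ⟨g1, g2⟩ := pvRectFold_length bg I L res p.1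
    have hIm : ∀ i ∈ I, 0 ≤ i ∧ i < (res.length : Int) := by
      intro i hi
      rw [hI, PySem.List.mem_pyRange_one] at hi
      exact ⟨by omega, by omega⟩
    have hLm : ∀ i ∈ I, ∀ j ∈ L, 0 ≤ j ∧ j < (pvRowLen res i : Int) := by
      intro i hi j hj
      rw [hI, PySem.List.mem_pyRange_one] at hi
      rw [hLdef, PySem.List.mem_pyRange_one] at hj
      have := hrl i (by omega) (by omega)
      exact ⟨by omega, by omega⟩
    have hrect := pvGetC_rectFold bg I L res p.1 hpbg hIm hLm ii jj hii hjj
    have hv' : ∀ q ∈ rest, pvValid bg res' q := by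
      intro q hq
      obtain ⟨a1, a2, a3, a4, a5, a6, a7⟩ := hv q (by simp [hq])
      refine ⟨a1, a2, a3, ?_, a5, a6, ?_⟩
      · rw [hres', g1]; exact a4
      · intro i h1 h2; rw [hres', g2 i]; exact a7 i h1 h2
    rw [hstep, ih res' hv', hrect, pvPaint_cons]
    have hcov : (ii ∈ I ∧ jj ∈ L) ↔
        (p.2.1 ≤ ii ∧ ii ≤ p.2.2.1 ∧ p.2.2.2.1 ≤ jj ∧ jj ≤ p.2.2.2.2) := by
      rw [hI, hLdef, PySem.List.mem_pyRange_one, PySem.List.mem_pyRange_one]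
      constructor <;> intro h <;> omega
    by_cases hbg : pvGetC res ii jj = bg
    · by_cases hP : p.2.1 ≤ ii ∧ ii ≤ p.2.2.1 ∧ p.2.2.2.1 ≤ jj ∧ jj ≤ p.2.2.2.2
      · rw [if_pos hbg, if_pos hP, if_pos ⟨(hcov.mpr hP).1, (hcov.mpr hP).2, hbg⟩,
          pvPaint_of_ne]
        exact hpbg
      · rw [if_pos hbg, if_neg hP, if_neg (by rw [← and_assoc, hcov]; tauto), hbg]
    · rw [if_neg hbg, if_neg (by tauto)]
      exact pvPaint_of_ne bg rest ii jj _ hbg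


lemma pvBounds_eq (g : List (List Int)) (bg cols : Int) :
    pvBoundsA g bg (PySem.List.len g) cols = pvBoundsB g bg cols := by
  unfold pvBoundsA pvBoundsB
  rw [PySem.List.enumerate_eq_map_pyRange g [], List.foldl_map]
  congr 1
  funext d i
  congr 1
  funext d j
  simp only
  cases h1 : (PySem.List.pyGetD (PySem.List.pyGetD g i []) j 0 == bg)
  · cases h2 : PySem.Dict.contains d (PySem.List.pyGetD (PySem.List.pyGetD g i []) j 0)
    · simp [h1, h2]
    · simp [h1, h2]
  · simp [h1]

def pvBoxOk (bg : Int) (rows cols : Int) (p : Int × (Int × Int × Int × Int)) : Prop :=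
  p.1 ≠ bg ∧ 0 ≤ p.2.1 ∧ p.2.1 ≤ p.2.2.1 ∧ p.2.2.1 < rows ∧
    0 ≤ p.2.2.2.1 ∧ p.2.2.2.1 ≤ p.2.2.2.2 ∧ p.2.2.2.2 < cols

lemma pvDict_getD_mem {d : PySem.Dict Int (Int × Int × Int × Int)} {c : Int}
    (h : PySem.Dict.contains d c = true) (dflt : Int × Int × Int × Int) :
    (c, PySem.Dict.getD d c dflt) ∈ d.items := by
  unfold PySem.Dict.contains at h
  have hf : (d.items.find? (fun p => p.1 == c)).isSome := by
    rw [List.find?_isSome]; simpa using h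
  obtain ⟨q, hq⟩ := Option.isSome_iff_exists.mp hf
  have hqm := List.mem_of_find?_eq_some hq
  have hqc : q.1 = c := by
    have := List.find?_some hq
    simpa using this
  have : PySem.Dict.getD d c dflt = q.2 := by
    unfold PySem.Dict.getD PySem.Dict.get?
    rw [hq]
    rfl
  rw [this, ← hqc]
  exact hqm

lemma pvFoldlInv {α β : Type} (l : List α) (f : β → α → β) (b : β) (P : β → Prop)
    (hb : P b) (hstep : ∀ d x, x ∈ l → P d → P (f d x)) : P (l.foldl f b) := by
  induction l generalizing b with
  | nil => exact hb
  | cons x xs ih =>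
    rw [List.foldl_cons]
    exact ih (f b x) (hstep b x (by simp) hb) (fun d y hy hd => hstep d y (by simp [hy]) hd)

lemma pvBoundsB_valid (g : List (List Int)) (bg cols : Int) :
    ∀ p ∈ (pvBoundsB g bg cols).items, pvBoxOk bg (g.length : Int) cols p := by
  unfold pvBoundsB
  refine pvFoldlInv _ _ _ (fun (d : PySem.Dict Int (Int × Int × Int × Int)) => ∀ p ∈ d.items, pvBoxOk bg (g.length : Int) cols p) ?_ ?_
  · intro p hp
    simp [PySem.Dict.empty] at hp
  · intro d pr hpr hd
    refine pvFoldlInv _ _ _ (fun (d : PySem.Dict Int (Int × Int × Int × Int)) => ∀ p ∈ d.items, pvBoxOk bg (g.length : Int) cols p) hd ?_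
    · intro d' j hj hd'
      have hje : 0 ≤ j ∧ j < cols := PySem.List.mem_pyRange_one.mp hj
      have hie : 0 ≤ pr.1 ∧ pr.1 < (g.length : Int) := by
        rw [PySem.List.enumerate_eq_map_pyRange g []] at hpr
        obtain ⟨iidx, hmem, he⟩ := List.mem_map.mp hpr
        have hb := PySem.List.mem_pyRange_one.mp hmem
        have hpr1 : pr.1 = iidx := by rw [← he]
        unfold PySem.List.len at hb
        rw [hpr1]
        omega
      simp only
      set c := PySem.List.pyGetD pr.2 j 0 with hc
      cases h1 : (c == bg)
      · have hcbg : c ≠ bg := by simpa using h1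
        simp only [h1, Bool.false_eq_true, if_false]
        cases h2 : PySem.Dict.contains d' c
        · simp only [h2, Bool.false_eq_true, if_false]
          intro p hp
          rcases (PySem.Dict.mem_items_insert d' c (pr.1, pr.1, j, j) p).mp hp with he | ⟨hm, _⟩
          · subst he
            exact ⟨hcbg, by simp; omega, by simp, by simp; omega, by simp; omega, by simp,
              by simp; omega⟩
          · exact hd' p hm
        · simp only [h2, if_true]
          have hbm := pvDict_getD_mem h2 (0, 0, 0, 0)
          have hb := hd' _ hbm
          obtain ⟨b1, b2, b3, b4, b5, b6, b7⟩ := hb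
          intro p hp
          rcases (PySem.Dict.mem_items_insert d' c _ p).mp hp with he | ⟨hm, _⟩
          · subst he
            refine ⟨hcbg, ?_, ?_, ?_, ?_, ?_, ?_⟩ <;> simp at b2 b3 b4 b5 b6 b7 ⊢ <;> omega
          · exact hd' p hm
      · simpa [h1] using hd'

-- ===== VERDICT (by name: the statement is the Claim_ definition above) =====

lemma pvRowLen_of_range (res : List (List Int)) (n : Nat) (h : n < res.length) :
    pvRowLen res (n : Int) = res[n].length := by
  unfold pvRowLen
  rw [pyGetD_some _ (pyIdx?_of_range res.length (n : Int) (by omega) (by omega))]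
  simp

lemma pvGetC_of_range (res : List (List Int)) (n m : Nat) (hn : n < res.length)
    (hm : m < res[n].length) :
    pvGetC res (n : Int) (m : Int) = res[n][m] := by
  unfold pvGetC
  rw [pyGetD_some _ (pyIdx?_of_range res.length (n : Int) (by omega) (by omega))]
  simp only [Int.toNat_natCast]
  rw [pyGetD_some _ (pyIdx?_of_range res[n].length (m : Int) (by omega) (by omega))]
  simp

theorem fill_rectangle_per_color_spec : Claim_equal_fill_rectangle_per_color := by
  intro g hdom hpre
  unfold Spec_fill_rectangle_per_color
  cases g with
  | nil => rfl
  | cons r0 t =>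
    by_cases h0 : r0 = []
    · simp [fill_rectangle_per_color, fill_rectangle_per_color_alt, h0]
    · simp only [fill_rectangle_per_color, fill_rectangle_per_color_alt, if_neg h0]
      rw [pvBounds_eq]
      set G : List (List Int) := r0 :: t with hG
      set bg := pvBg G with hbg
      set items := (pvBoundsB G bg (PySem.List.len r0)).items with hitems
      have hmap : G.map (fun row => row) = G := by simp
      rw [hmap]
      -- row lengths: every row of G has at least r0.length cells
      have hrowlen : ∀ n (h : n < G.length), r0.length ≤ G[n].length := by
        intro n h
        have := hpre G[n] (List.getElem_mem h)
        simpa [hG] using this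
      -- validity of the bounds entries
      have hval : ∀ p ∈ items, pvValid bg G p := by
        intro p hp
        obtain ⟨b1, b2, b3, b4, b5, b6, b7⟩ := pvBoundsB_valid G bg (PySem.List.len r0) p hp
        refine ⟨b1, b2, b3, b4, b5, b6, ?_⟩
        intro i hi1 hi2
        have hi0 : 0 ≤ i := by omega
        have hilt : i < (G.length : Int) := by omega
        have : i = ((i.toNat : Nat) : Int) := by omega
        rw [this, pvRowLen_of_range G i.toNat (by omega)]
        have := hrowlen i.toNat (by omega)
        have h7 : p.2.2.2.2 < ((r0.length : Nat) : Int) := by simpa [PySem.List.len] using b7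
        omega
      obtain ⟨hfl, hfrl⟩ := pvFill_length bg items G
      apply List.ext_getElem
      · rw [hfl]
        simp
      · intro n hn1 hn2
        have hnG : n < G.length := by rw [← hfl]; exact hn1
        have hrleq : (pvFill bg items G)[n].length = G[n].length := by
          have e1 := hfrl (n : Int)
          rw [pvRowLen_of_range _ n hn1, pvRowLen_of_range _ n hnG] at e1
          exact e1
        apply List.ext_getElem
        · rw [hrleq]
          simp [PySem.List.getElem_enumerate]
        · intro m hm1 hm2
          have hmG : m < G[n].length := by rw [← hrleq]; exact hm1
          -- left side: the fill result, cell by cell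
          have hl : (pvFill bg items G)[n][m] = pvPaint bg items (n : Int) (m : Int) G[n][m] := by
            rw [← pvGetC_of_range _ n m hn1 (by rw [hrleq]; exact hmG)]
            rw [pvGetC_fill bg items G hval (n : Int) (m : Int) (by omega) (by omega)]
            rw [pvGetC_of_range G n m hnG hmG]
          rw [hl]
          -- right side
          simp [PySem.List.getElem_enumerate]
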